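-- pv_equiv track=rewrite | github.com/venkatmiriyala19/CodingNinjas | Absolute difference in an array.py | absDiff
-- ===== SOURCE A (Python) =====
-- def absDiff(arr, n):
--     if n==1:
--         return [arr[0],0]
--     even=arr[0]
--     odd=arr[1]
--     for i in range(2,n):
--         if i%2==0:
--             even=abs(even-arr[i])
--         else:
--             odd=abs(odd-arr[i])
--     return [even,odd]
--
--
--     # Write your code here.
--     pass
-- ===== SOURCE B (Python) =====
-- def _chain(seed, xs):
--     for x in xs:
--         seed = abs(seed - x)
--     return seed
--
--
-- def absDiff(arr, n):
--     if n == 1: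
--         return [arr[0], 0]
--     if n <= 2:
--         return [arr[0], arr[1]]
--     return [_chain(arr[0], arr[2:n:2]), _chain(arr[1], arr[3:n:2])]
-- ===== Notes on version B (the rewrite author's own statement) =====
-- stated objective: alternative
-- what changed: Replaces the single index loop with its per-iteration parity branch by two strided slices (arr[2:n:2], arr[3:n:2]), each folded independently by a seeded abs-difference chain helper.
import Mathlib
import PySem

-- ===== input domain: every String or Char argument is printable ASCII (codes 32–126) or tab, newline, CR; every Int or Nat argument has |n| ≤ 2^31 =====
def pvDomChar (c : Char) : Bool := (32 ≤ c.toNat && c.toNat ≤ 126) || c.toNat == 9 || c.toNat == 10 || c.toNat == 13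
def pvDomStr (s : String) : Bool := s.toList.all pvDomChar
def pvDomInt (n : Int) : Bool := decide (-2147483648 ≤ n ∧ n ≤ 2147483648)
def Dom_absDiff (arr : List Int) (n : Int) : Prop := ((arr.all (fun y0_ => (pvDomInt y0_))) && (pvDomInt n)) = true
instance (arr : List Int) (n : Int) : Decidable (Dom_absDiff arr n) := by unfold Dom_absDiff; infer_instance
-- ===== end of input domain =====

-- B replaces A's single index loop with a parity branch by two strided slices, each folded by a
-- seeded abs-difference chain (alternative decomposition, same cost).


-- ===== PORT A =====
-- arr[i] is ported as pyGetD (default 0): Pre_absDiff guarantees every access is in range.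
def absDiff (arr : List Int) (n : Int) : List Int :=
  if n == 1 then [PySem.List.pyGetD arr 0 0, 0]
  else
    let s :=
      (PySem.List.pyRange 2 n 1).foldl
        (fun (s : Int × Int) i =>
          if PySem.Int.mod i 2 == 0 then (|s.1 - PySem.List.pyGetD arr i 0|, s.2)
          else (s.1, |s.2 - PySem.List.pyGetD arr i 0|))
        (PySem.List.pyGetD arr 0 0, PySem.List.pyGetD arr 1 0)
    [s.1, s.2]

-- ===== PORT B =====
-- _chain(seed, xs): the running abs-difference fold
def pvChain (seed : Int) (xs : List Int) : Int := xs.foldl (fun a b => |a - b|) seed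

-- arr[2:n:2] / arr[3:n:2]: slice? with step 2 is never none (step ≠ 0), so .getD [] is exact.
def absDiff_alt (arr : List Int) (n : Int) : List Int :=
  if n == 1 then [PySem.List.pyGetD arr 0 0, 0]
  else if n ≤ 2 then [PySem.List.pyGetD arr 0 0, PySem.List.pyGetD arr 1 0]
  else [pvChain (PySem.List.pyGetD arr 0 0) ((PySem.List.slice? arr (some 2) (some n) 2).getD []),
        pvChain (PySem.List.pyGetD arr 1 0) ((PySem.List.slice? arr (some 3) (some n) 2).getD [])]

-- ===== PRECONDITION & SPEC =====
-- exactly the inputs where Python A returns: n == 1 needs arr[0]; otherwise arr[0], arr[1] and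
-- arr[i] for i in range(2, n) must exist (IndexError otherwise)
def Pre_absDiff (arr : List Int) (n : Int) : Prop :=
  (n = 1 ∧ 1 ≤ arr.length) ∨ (n ≠ 1 ∧ 2 ≤ arr.length ∧ n ≤ (arr.length : Int))
instance (arr : List Int) (n : Int) : Decidable (Pre_absDiff arr n) := by unfold Pre_absDiff; infer_instance

def pvWitness_absDiff : List Int × Int := ([1, 5, 2], 3)

def Spec_absDiff (arr : List Int) (n : Int) (out : List Int) : Prop := out = absDiff_alt arr n
instance (arr : List Int) (n : Int) (out : List Int) : Decidable (Spec_absDiff arr n out) := by unfold Spec_absDiff; infer_instance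

-- ===== CLAIM (what is proved, stated in full; the proofs are below) =====
def Claim_equal_absDiff : Prop := ∀ (arr : List Int) (n : Int), Dom_absDiff arr n → Pre_absDiff arr n → Spec_absDiff arr n (absDiff arr n)

-- ===== LEMMAS AND PROOFS =====

-- range(a, b, 2) is empty when b ≤ a
lemma pvRange2_nil (a b : Int) (h : b ≤ a) : PySem.List.pyRange a b 2 = [] := by
  rw [PySem.List.pyRange_of_pos a b (by norm_num)]
  simp [show ¬ a < b by omega]

-- cons form of range(a, b, 2)
lemma pvRange2_cons (a b : Int) (h : a < b) :
    PySem.List.pyRange a b 2 = a :: PySem.List.pyRange (a + 2) b 2 := by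
  rw [PySem.List.pyRange_of_pos a b (by norm_num), PySem.List.pyRange_of_pos (a + 2) b (by norm_num)]
  by_cases h2 : a + 2 < b
  · have hc : ((b - a + 2 - 1) / 2).toNat = ((b - (a + 2) + 2 - 1) / 2).toNat + 1 := by omega
    rw [if_pos h, if_pos h2, hc, List.range_succ_eq_map]
    simp only [List.map_cons, List.map_map, Nat.cast_zero, mul_zero, add_zero, List.cons.injEq,
      true_and]
    apply List.map_congr_left
    intro k _
    simp only [Function.comp_apply]
    push_cast
    ring
  · have hc : ((b - a + 2 - 1) / 2).toNat = 1 := by omega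
    rw [if_pos h, if_neg h2, hc]
    simp

-- arr[a:n:2] (0 ≤ a ≤ n ≤ len(arr)) is range(a, n, 2) mapped through indexing
lemma pvSlice2 (arr : List Int) (a n : Int) (h0 : 0 ≤ a) (han : a ≤ n) (hn : n ≤ (arr.length : Int)) :
    (PySem.List.slice? arr (some a) (some n) 2).getD []
      = (PySem.List.pyRange a n 2).map (fun i => PySem.List.pyGetD arr i 0) := by
  unfold PySem.List.slice? PySem.List.sliceIndices
  rw [PySem.List.pyRange_of_pos a n (by norm_num)]
  simp only [show ¬ ((2:Int) = 0) by norm_num, if_false, show ¬ ((2:Int) < 0) by norm_num,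
    show ¬ a < 0 by omega, show ¬ n < 0 by omega]
  have hsa : min a (arr.length : Int) = a := by omega
  have hsn : min n (arr.length : Int) = n := by omega
  rw [hsa, hsn]
  by_cases hlt : a < n
  · simp only [if_pos hlt, show (0:Int) < 2 by norm_num, if_true, Option.getD_some, List.map_map]
    apply List.filterMap_eq_map_iff_forall_eq_some.mpr
    intro k hk
    simp only [Function.comp_apply]
    have hk' : (k : Int) < (n - a + 2 - 1) / 2 := by
      have := List.mem_range.mp hk
      omega
    have hidx : 0 ≤ a + 2 * (k : Int) ∧ a + 2 * (k : Int) < (arr.length : Int) := by omega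
    have htn : (a + 2 * (k : Int)).toNat < arr.length := by omega
    rw [List.getElem?_eq_getElem htn]
    congr 1
    rw [PySem.List.pyGetD_of_nonneg arr 0 hidx.1]
    rw [List.getD_eq_getElem arr 0 htn]
  · simp [hlt]

-- the core interleaving invariant: A's single parity-branching pass from an even index m equals
-- B's two independent strided folds, by two-at-a-time induction on the remaining count
lemma pvKey (arr : List Int) (n : Int) :
    ∀ (c : Nat) (m e o : Int), (n - m).toNat = c → m % 2 = 0 →
      (PySem.List.pyRange m n 1).foldl
          (fun (s : Int × Int) i =>
            if PySem.Int.mod i 2 == 0 then (|s.1 - PySem.List.pyGetD arr i 0|, s.2)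
            else (s.1, |s.2 - PySem.List.pyGetD arr i 0|)) (e, o)
        = (((PySem.List.pyRange m n 2).map (fun i => PySem.List.pyGetD arr i 0)).foldl
              (fun a b => |a - b|) e,
           ((PySem.List.pyRange (m + 1) n 2).map (fun i => PySem.List.pyGetD arr i 0)).foldl
              (fun a b => |a - b|) o)
  | 0, m, e, o, hc, hm => by
      have h1 : n ≤ m := by omega
      rw [PySem.List.pyRange_one_eq_nil h1, pvRange2_nil _ _ h1, pvRange2_nil _ _ (by omega)]
      simp
  | 1, m, e, o, hc, hm => by
      have h1 : m < n := by omega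
      have hmod : PySem.Int.mod m 2 = 0 := by
        rw [PySem.Int.mod_eq_emod_of_pos (by norm_num)]; exact hm
      rw [PySem.List.pyRange_one_cons h1, PySem.List.pyRange_one_eq_nil (by omega),
        pvRange2_cons _ _ h1, pvRange2_nil (m + 2) n (by omega), pvRange2_nil (m + 1) n (by omega)]
      simp only [hmod, List.map_cons, List.map_nil, List.foldl_cons, List.foldl_nil]
      norm_num
  | (c + 2), m, e, o, hc, hm => by
      have h1 : m < n := by omega
      have h2 : m + 1 < n := by omega
      have hmod : PySem.Int.mod m 2 = 0 := by
        rw [PySem.Int.mod_eq_emod_of_pos (by norm_num)]; exact hm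
      have hmod1 : PySem.Int.mod (m + 1) 2 = 1 := by
        rw [PySem.Int.mod_eq_emod_of_pos (by norm_num)]; omega
      rw [PySem.List.pyRange_one_cons h1, PySem.List.pyRange_one_cons h2,
        pvRange2_cons _ _ h1, pvRange2_cons _ _ h2]
      simp only [List.foldl_cons, List.map_cons, hmod, hmod1]
      have h3 : m + 1 + 2 = m + 2 + 1 := by ring
      have h4 : m + 1 + 1 = m + 2 := by ring
      rw [h3, h4]
      simpa using pvKey arr n c (m + 2) (|e - PySem.List.pyGetD arr m 0|)
        (|o - PySem.List.pyGetD arr (m + 1) 0|) (by omega) (by omega)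

-- ===== VERDICT (by name: the statement is the Claim_ definition above) =====
theorem absDiff_spec : Claim_equal_absDiff := by
  intro arr n _ hpre
  unfold Spec_absDiff absDiff absDiff_alt
  by_cases h1 : n = 1
  · simp [h1]
  · have hb : (n == 1) = false := by simp [h1]
    have hlen : 2 ≤ arr.length ∧ n ≤ (arr.length : Int) := by
      rcases hpre with ⟨h, _⟩ | ⟨_, h2, h3⟩
      · exact absurd h h1
      · exact ⟨h2, h3⟩
    rw [hb]
    simp only [Bool.false_eq_true, if_false]
    by_cases h2 : n ≤ 2
    · rw [if_pos h2, PySem.List.pyRange_one_eq_nil h2]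
      simp
    · rw [if_neg h2]
      rw [pvSlice2 arr 2 n (by norm_num) (by omega) hlen.2,
          pvSlice2 arr 3 n (by norm_num) (by omega) hlen.2]
      have hkey := pvKey arr n (n - 2).toNat 2 (PySem.List.pyGetD arr 0 0)
        (PySem.List.pyGetD arr 1 0) rfl (by norm_num)
      have h23 : (2 : Int) + 1 = 3 := by norm_num
      rw [h23] at hkey
      simp only [pvChain, hkey]
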